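-- pv_equiv track=rewrite | github.com/DiamondGotCat/Nelm | scripts/wikipedia_downloader.py | _remove_tables
-- ===== SOURCE A (Python) =====
-- def _remove_tables(text: str) -> str:
--     out = []
--     i = 0
--     n = len(text)
--     depth = 0
--     while i < n:
--         if text.startswith("{|", i):
--             depth += 1
--             i += 2
--             continue
--         if depth > 0 and text.startswith("|}", i):
--             depth -= 1
--             i += 2
--             continue
--         if depth == 0:
--             out.append(text[i])
--         i += 1
--     return "".join(out)
-- ===== SOURCE B (Python) =====
-- def _remove_tables(text: str) -> str:
--     # Marker-jump scan: instead of stepping one character at a time, locate the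
--     # next "{|" / "|}" marker with str.find and copy/skip whole slices.
--     out = []
--     rest = text
--     depth = 0
--     while True:
--         if depth == 0:
--             k = rest.find("{|")
--             if k == -1:
--                 out.append(rest)
--                 break
--             out.append(rest[:k])
--             rest = rest[k + 2:]
--             depth = 1
--         else:
--             ko = rest.find("{|")
--             kc = rest.find("|}")
--             if ko == -1 and kc == -1:
--                 break
--             if kc == -1 or (ko != -1 and ko < kc):
--                 depth += 1
--                 rest = rest[ko + 2:]
--             else:
--                 depth -= 1
--                 rest = rest[kc + 2:]
--     return "".join(out)
-- ===== Notes on version B (the rewrite author's own statement) =====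
-- stated objective: alternative
-- what changed: Replaces A's per-character while loop (index + startswith at every position) by a marker-jump scan: str.find locates the next '{|'/'|}' marker and whole slices are copied (depth 0) or skipped (depth > 0) in one step.
import Mathlib
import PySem

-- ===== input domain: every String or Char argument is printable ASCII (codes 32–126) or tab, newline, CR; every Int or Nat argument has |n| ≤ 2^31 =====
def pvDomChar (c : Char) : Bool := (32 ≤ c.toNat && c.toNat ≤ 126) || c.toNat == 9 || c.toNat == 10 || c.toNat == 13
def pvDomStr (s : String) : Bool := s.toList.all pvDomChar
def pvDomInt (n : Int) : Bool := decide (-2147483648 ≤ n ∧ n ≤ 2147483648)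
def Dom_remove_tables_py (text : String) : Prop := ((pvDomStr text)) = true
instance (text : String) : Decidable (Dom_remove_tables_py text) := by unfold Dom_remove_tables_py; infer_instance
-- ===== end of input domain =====

-- B replaces A's one-character-at-a-time scan by jumping between "{|"/"|}" markers
-- found with str.find, copying/skipping whole slices (objective: alternative decomposition).

-- ===== PORT A =====
-- per-character while loop over the string, ported as structural recursion over the char list
def remove_tables_py_loop (l : List Char) (d : Nat) : List Char :=
  match l with
  | [] => []
  | [c1] => if d = 0 then [c1] else []    -- last character: no 2-char marker can start here
  | c1 :: c2 :: rest2 =>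
    if c1 = '{' ∧ c2 = '|' then remove_tables_py_loop rest2 (d + 1)
    else if 0 < d ∧ c1 = '|' ∧ c2 = '}' then remove_tables_py_loop rest2 (d - 1)
    else if d = 0 then c1 :: remove_tables_py_loop (c2 :: rest2) d
    else remove_tables_py_loop (c2 :: rest2) d

def remove_tables_py (text : String) : String :=
  String.ofList (remove_tables_py_loop text.toList 0)

-- ===== PORT B =====
-- rest.find("{|") / rest.find("|}") : index of first occurrence of the 2-char pattern (none = -1)
def pvFind2 (a b : Char) : List Char → Option Nat
  | [] => none
  | [_] => none
  | x :: y :: rest =>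
    if x = a ∧ y = b then some 0 else (pvFind2 a b (y :: rest)).map (· + 1)

-- needed by the termination argument of the B loop
theorem pvFind2_le {a b : Char} : ∀ {l : List Char} {k : Nat},
    pvFind2 a b l = some k → k + 2 ≤ l.length := by
  intro l
  induction l with
  | nil => intro k h; simp [pvFind2] at h
  | cons x t ih =>
    intro k h
    cases t with
    | nil => simp [pvFind2] at h
    | cons y r =>
      rw [pvFind2] at h
      split_ifs at h with hp
      · simp at h
        simp only [List.length_cons]
        omega
      · simp only [Option.map_eq_some_iff] at h
        obtain ⟨j, hj, hk⟩ := h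
        have := ih hj
        simp only [List.length_cons] at this ⊢
        omega

def remove_tables_py_alt_loop (l : List Char) (d : Nat) : List Char :=
  if d = 0 then
    match h : pvFind2 '{' '|' l with
    | none => l
    | some k => l.take k ++ remove_tables_py_alt_loop (l.drop (k + 2)) 1
  else
    match h1 : pvFind2 '{' '|' l, h2 : pvFind2 '|' '}' l with
    | none, none => []
    | some ko, none => remove_tables_py_alt_loop (l.drop (ko + 2)) (d + 1)
    | none, some kc => remove_tables_py_alt_loop (l.drop (kc + 2)) (d - 1)
    | some ko, some kc =>
      if ko < kc then remove_tables_py_alt_loop (l.drop (ko + 2)) (d + 1)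
      else remove_tables_py_alt_loop (l.drop (kc + 2)) (d - 1)
termination_by l.length
decreasing_by
  all_goals (first
    | (have := pvFind2_le h; simp [List.length_drop]; omega)
    | (have := pvFind2_le h1; simp [List.length_drop]; omega)
    | (have := pvFind2_le h2; simp [List.length_drop]; omega))

def remove_tables_py_alt (text : String) : String :=
  String.ofList (remove_tables_py_alt_loop text.toList 0)

-- ===== PRECONDITION & SPEC =====
def Spec_remove_tables_py (text : String) (out : String) : Prop := out = remove_tables_py_alt text
instance (text : String) (out : String) : Decidable (Spec_remove_tables_py text out) := by unfold Spec_remove_tables_py; infer_instance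

-- ===== CLAIM (what is proved, stated in full; the proofs are below) =====
def Claim_equal_remove_tables_py : Prop := ∀ (text : String), Dom_remove_tables_py text → Spec_remove_tables_py text (remove_tables_py text)

-- ===== LEMMAS AND PROOFS =====

theorem altLoop_nil (d : Nat) : remove_tables_py_alt_loop [] d = [] := by
  rw [remove_tables_py_alt_loop]
  split_ifs <;> (split <;> simp_all [pvFind2])

theorem altLoop_single (c : Char) (d : Nat) :
    remove_tables_py_alt_loop [c] d = if d = 0 then [c] else [] := by
  rw [remove_tables_py_alt_loop]
  split_ifs <;> (split <;> simp_all [pvFind2])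

theorem pvFind2_cons {a b x y : Char} {r : List Char} (h : ¬ (x = a ∧ y = b)) :
    pvFind2 a b (x :: y :: r) = (pvFind2 a b (y :: r)).map (· + 1) := by
  rw [pvFind2]; simp [h]

theorem altLoop_open (t : List Char) (d : Nat) :
    remove_tables_py_alt_loop ('{' :: '|' :: t) d = remove_tables_py_alt_loop t (d + 1) := by
  have hopen : pvFind2 '{' '|' ('{' :: '|' :: t) = some 0 := by simp [pvFind2]
  have hclose : pvFind2 '|' '}' ('{' :: '|' :: t)
      = (pvFind2 '|' '}' ('|' :: t)).map (· + 1) := pvFind2_cons (by simp)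
  rw [remove_tables_py_alt_loop]
  split_ifs with hd
  · subst hd
    split
    · simp_all
    · next k heq =>
        rw [hopen] at heq
        cases heq
        simp
  · split
    · simp_all
    · next ko heq1 heq2 =>
        rw [hopen] at heq1; cases heq1
        simp
    · simp_all
    · next ko kc heq1 heq2 =>
        rw [hopen] at heq1; cases heq1
        rw [hclose] at heq2
        obtain ⟨j, hj, hk⟩ := Option.map_eq_some_iff.mp heq2
        rw [if_pos (by omega)]
        simp

theorem altLoop_close (t : List Char) (d : Nat) :
    remove_tables_py_alt_loop ('|' :: '}' :: t) (d + 1) = remove_tables_py_alt_loop t d := by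
  have hclose : pvFind2 '|' '}' ('|' :: '}' :: t) = some 0 := by simp [pvFind2]
  have hopen : pvFind2 '{' '|' ('|' :: '}' :: t)
      = (pvFind2 '{' '|' ('}' :: t)).map (· + 1) := pvFind2_cons (by simp)
  rw [remove_tables_py_alt_loop]
  rw [if_neg (Nat.succ_ne_zero d)]
  split
  · simp_all
  · next ko heq1 heq2 =>
      rw [hclose] at heq2; simp at heq2
  · next kc heq1 heq2 =>
      rw [hclose] at heq2; cases heq2
      simp
  · next ko kc heq1 heq2 =>
      rw [hclose] at heq2; cases heq2
      rw [hopen] at heq1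
      obtain ⟨j, hj, hk⟩ := Option.map_eq_some_iff.mp heq1
      rw [if_neg (by omega)]
      simp

theorem altLoop_skip0 (c1 c2 : Char) (t : List Char) (h : ¬ (c1 = '{' ∧ c2 = '|')) :
    remove_tables_py_alt_loop (c1 :: c2 :: t) 0
      = c1 :: remove_tables_py_alt_loop (c2 :: t) 0 := by
  have hshift : pvFind2 '{' '|' (c1 :: c2 :: t)
      = (pvFind2 '{' '|' (c2 :: t)).map (· + 1) := pvFind2_cons h
  rw [remove_tables_py_alt_loop]
  rw [if_pos rfl]
  conv_rhs => rw [remove_tables_py_alt_loop]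
  rw [if_pos rfl]
  split
  · next heq =>
      rw [hshift] at heq
      simp at heq
      rw [heq]
  · next k heq =>
      rw [hshift] at heq
      obtain ⟨j, hj, hk⟩ := Option.map_eq_some_iff.mp heq
      subst hk
      rw [hj]
      have h1 : (c1 :: c2 :: t).take (j + 1) = c1 :: (c2 :: t).take j := by simp
      have h2 : (c1 :: c2 :: t).drop (j + 1 + 2) = (c2 :: t).drop (j + 2) := by simp
      rw [h1, h2]
      simp

theorem altLoop_skip (c1 c2 : Char) (t : List Char) (d : Nat)
    (ho : ¬ (c1 = '{' ∧ c2 = '|')) (hc : ¬ (c1 = '|' ∧ c2 = '}')) :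
    remove_tables_py_alt_loop (c1 :: c2 :: t) (d + 1)
      = remove_tables_py_alt_loop (c2 :: t) (d + 1) := by
  have hso : pvFind2 '{' '|' (c1 :: c2 :: t) = (pvFind2 '{' '|' (c2 :: t)).map (· + 1) :=
    pvFind2_cons ho
  have hsc : pvFind2 '|' '}' (c1 :: c2 :: t) = (pvFind2 '|' '}' (c2 :: t)).map (· + 1) :=
    pvFind2_cons hc
  rw [remove_tables_py_alt_loop]
  rw [if_neg (Nat.succ_ne_zero d)]
  conv_rhs => rw [remove_tables_py_alt_loop]
  rw [if_neg (Nat.succ_ne_zero d)]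
  have hdrop : ∀ k : Nat, (c1 :: c2 :: t).drop (k + 1 + 2) = (c2 :: t).drop (k + 2) := by
    intro k; simp
  split
  · next heq1 heq2 =>
      rw [hso] at heq1; rw [hsc] at heq2
      simp at heq1 heq2
      split <;> simp_all
  · next ko heq1 heq2 =>
      rw [hso] at heq1; rw [hsc] at heq2
      obtain ⟨j, hj, hk⟩ := Option.map_eq_some_iff.mp heq1
      simp at heq2
      subst hk
      rw [hdrop j]
      split
      · simp_all
      · next ko' heq1' heq2' => rw [hj] at heq1'; cases heq1'; rfl
      · simp_all
      · simp_all
  · next kc heq1 heq2 =>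
      rw [hso] at heq1; rw [hsc] at heq2
      obtain ⟨j, hj, hk⟩ := Option.map_eq_some_iff.mp heq2
      simp at heq1
      subst hk
      rw [hdrop j]
      split
      · simp_all
      · simp_all
      · next kc' heq1' heq2' => rw [hj] at heq2'; cases heq2'; rfl
      · simp_all
  · next ko kc heq1 heq2 =>
      rw [hso] at heq1; rw [hsc] at heq2
      obtain ⟨j1, hj1, hk1⟩ := Option.map_eq_some_iff.mp heq1
      obtain ⟨j2, hj2, hk2⟩ := Option.map_eq_some_iff.mp heq2
      subst hk1; subst hk2
      rw [hdrop j1, hdrop j2]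
      by_cases hlt : j1 < j2
      · rw [if_pos (show j1 + 1 < j2 + 1 by omega)]
        split
        · simp_all
        · simp_all
        · simp_all
        · next ko' kc' heq1' heq2' =>
            rw [hj1] at heq1'; cases heq1'
            rw [hj2] at heq2'; cases heq2'
            rw [if_pos hlt]
      · rw [if_neg (show ¬ j1 + 1 < j2 + 1 by omega)]
        split
        · simp_all
        · simp_all
        · simp_all
        · next ko' kc' heq1' heq2' =>
            rw [hj1] at heq1'; cases heq1'
            rw [hj2] at heq2'; cases heq2'
            rw [if_neg hlt]

theorem loops_agree : ∀ (n : Nat) (l : List Char), l.length ≤ n → ∀ (d : Nat),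
    remove_tables_py_loop l d = remove_tables_py_alt_loop l d := by
  intro n
  induction n with
  | zero =>
    intro l hl d
    have : l = [] := by cases l <;> simp_all
    subst this
    simp [remove_tables_py_loop, altLoop_nil]
  | succ n ih =>
    intro l hl d
    match l with
    | [] => simp [remove_tables_py_loop, altLoop_nil]
    | [c] =>
      rw [altLoop_single]
      simp [remove_tables_py_loop]
    | c1 :: c2 :: t =>
      have hlen : t.length ≤ n := by simp at hl; omega
      have hlen2 : (c2 :: t).length ≤ n := by simp at hl ⊢; omega
      rw [remove_tables_py_loop]
      by_cases h1 : c1 = '{' ∧ c2 = '|'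
      · obtain ⟨rfl, rfl⟩ := h1
        rw [if_pos ⟨rfl, rfl⟩, altLoop_open]
        exact ih t hlen (d + 1)
      · rw [if_neg h1]
        by_cases h2 : 0 < d ∧ c1 = '|' ∧ c2 = '}'
        · obtain ⟨hd, rfl, rfl⟩ := h2
          obtain ⟨m, rfl⟩ : ∃ m, d = m + 1 := ⟨d - 1, by omega⟩
          rw [if_pos ⟨hd, rfl, rfl⟩, altLoop_close]
          simpa using ih t hlen m
        · rw [if_neg h2]
          by_cases hd : d = 0
          · subst hd
            rw [if_pos rfl, altLoop_skip0 c1 c2 t h1, ih (c2 :: t) hlen2 0]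
          · obtain ⟨m, rfl⟩ : ∃ m, d = m + 1 := ⟨d - 1, by omega⟩
            have hc : ¬ (c1 = '|' ∧ c2 = '}') := by
              intro hx; exact h2 ⟨by omega, hx⟩
            rw [if_neg (by omega : ¬ m + 1 = 0), altLoop_skip c1 c2 t m h1 hc]
            exact ih (c2 :: t) hlen2 (m + 1)

-- ===== VERDICT (by name: the statement is the Claim_ definition above) =====
theorem remove_tables_py_spec : Claim_equal_remove_tables_py := by
  intro text _
  unfold Spec_remove_tables_py remove_tables_py remove_tables_py_alt
  rw [loops_agree text.toList.length text.toList le_rfl 0]
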